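-- pv_equiv track=rewrite | github.com/Natycx/Jogo_da_velha | Jogo_da_velha.py | gerador_dica
-- ===== SOURCE A (Python) =====
-- def troca_jogador(jogador):
--     if jogador == 'x':
--         jogador = 'o'
--     else:
--         jogador = 'x'
--     return jogador
--
-- def gerador_dica(matriz, jogador):
--     possibilidades = []
--     oponente = troca_jogador(jogador)
--     condicao_vitoria = [
--         [(0, 0), (0, 1), (0, 2)],
--         [(1, 0), (1, 1), (1, 2)],
--         [(2, 0), (2, 1), (1, 2)],
--         [(0, 0), (1, 1), (2, 2)],
--         [(0, 2), (1, 1), (2, 0)],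
--         [(0, 0), (1, 0), (2, 0)],
--         [(0, 1), (1, 1), (2, 1)],
--         [(0, 2), (1, 2), (2, 1)]
--     ]
--
--     for x in condicao_vitoria:
--         posicao1 = matriz[x[0][0]][x[0][1]]
--         posicao2 = matriz[x[1][0]][x[1][1]]
--         posicao3 = matriz[x[2][0]][x[2][1]]
--         if posicao1 == posicao2 == jogador and posicao3 == '_':
--             possibilidades.append(x[2])
--         elif posicao2 == posicao3 == jogador and posicao1 == '_':
--             possibilidades.append(x[0])
--         elif posicao1 == posicao3 == jogador and posicao2 == '_':
--             possibilidades.append(x[1])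
--
--     if not bool(possibilidades):
--         for x in condicao_vitoria:
--             posicao1 = matriz[x[0][0]][x[0][1]]
--             posicao2 = matriz[x[1][0]][x[1][1]]
--             posicao3 = matriz[x[2][0]][x[2][1]]
--             if posicao1 == posicao2 == oponente and posicao3 == '_':
--                 possibilidades.append(x[2])
--             elif posicao2 == posicao3 == oponente and posicao1 == '_':
--                 possibilidades.append(x[0])
--             elif posicao1 == posicao3 == oponente and posicao2 == '_':
--                 possibilidades.append(x[1])
--
--     if not bool(possibilidades):
--         for x in condicao_vitoria:
--             posicao1 = matriz[x[0][0]][x[0][1]]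
--             posicao2 = matriz[x[1][0]][x[1][1]]
--             posicao3 = matriz[x[2][0]][x[2][1]]
--             if posicao1 == jogador and [posicao2, posicao3].count('_') == 2:
--                 possibilidades.extend([x[1], x[2]])
--             elif posicao2 == jogador and [posicao1, posicao3].count('_') == 2:
--                 possibilidades.extend([x[0], x[2]])
--             elif posicao3 == jogador and '_' and [posicao1, posicao2].count('_') == 2:
--                 possibilidades.extend([x[0], x[1]])
--
--     return possibilidades
-- ===== SOURCE B (Python) =====
-- def gerador_dica(matriz, jogador):
--     oponente = 'o' if jogador == 'x' else 'x'
--     condicao_vitoria = [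
--         [(0, 0), (0, 1), (0, 2)],
--         [(1, 0), (1, 1), (1, 2)],
--         [(2, 0), (2, 1), (1, 2)],
--         [(0, 0), (1, 1), (2, 2)],
--         [(0, 2), (1, 1), (2, 0)],
--         [(0, 0), (1, 0), (2, 0)],
--         [(0, 1), (1, 1), (2, 1)],
--         [(0, 2), (1, 2), (2, 1)]
--     ]
--     win, block, setup = [], [], []
--     for x in condicao_vitoria:
--         p1 = matriz[x[0][0]][x[0][1]]
--         p2 = matriz[x[1][0]][x[1][1]]
--         p3 = matriz[x[2][0]][x[2][1]]
--         # winning move for jogador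
--         if p1 == p2 == jogador and p3 == '_':
--             win.append(x[2])
--         elif p2 == p3 == jogador and p1 == '_':
--             win.append(x[0])
--         elif p1 == p3 == jogador and p2 == '_':
--             win.append(x[1])
--         # blocking move against oponente
--         if p1 == p2 == oponente and p3 == '_':
--             block.append(x[2])
--         elif p2 == p3 == oponente and p1 == '_':
--             block.append(x[0])
--         elif p1 == p3 == oponente and p2 == '_':
--             block.append(x[1])
--         # setup move: one mark of jogador on an otherwise empty line
--         if p1 == jogador and p2 == '_' and p3 == '_':
--             setup.extend([x[1], x[2]])
--         elif p2 == jogador and p1 == '_' and p3 == '_':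
--             setup.extend([x[0], x[2]])
--         elif p3 == jogador and p1 == '_' and p2 == '_':
--             setup.extend([x[0], x[1]])
--     return win or block or setup
-- ===== Notes on version B (the rewrite author's own statement) =====
-- stated objective: alternative
-- what changed: A's three sequential scans of the 8 win-lines with early exit become one single pass that maintains win/block/setup lists simultaneously, selecting the first non-empty list at the end.
import Mathlib
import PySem

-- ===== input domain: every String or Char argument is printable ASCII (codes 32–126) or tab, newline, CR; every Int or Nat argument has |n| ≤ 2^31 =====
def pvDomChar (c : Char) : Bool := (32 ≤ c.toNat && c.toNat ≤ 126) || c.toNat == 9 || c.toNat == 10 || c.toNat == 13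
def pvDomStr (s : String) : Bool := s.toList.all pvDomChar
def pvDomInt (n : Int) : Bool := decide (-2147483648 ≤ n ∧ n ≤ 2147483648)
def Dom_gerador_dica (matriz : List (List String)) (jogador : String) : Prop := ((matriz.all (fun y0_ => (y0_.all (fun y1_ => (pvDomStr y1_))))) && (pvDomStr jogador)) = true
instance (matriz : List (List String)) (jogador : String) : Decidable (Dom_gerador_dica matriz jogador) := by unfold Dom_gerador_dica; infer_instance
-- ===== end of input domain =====

-- B changes the decomposition only: one pass over the 8 lines keeping win/block/setup lists
-- instead of A's three sequential scans with early exit; same values (objective: alternative).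

-- ===== PORT A =====
-- cell m p = matriz[p.1][p.2]; indices here are the literals 0/1/2 from condicao_vitoria,
-- in range whenever Pre_ holds (Python raises IndexError outside Pre_, where nothing is claimed).
def cell (m : List (List String)) (p : Int × Int) : String :=
  PySem.List.pyGetD (PySem.List.pyGetD m p.1 []) p.2 ""

-- the table exactly as in the source, including its typo lines (2,0),(2,1),(1,2) and (0,2),(1,2),(2,1)
def condicao_vitoria : List ((Int × Int) × (Int × Int) × (Int × Int)) :=
  [((0, 0), (0, 1), (0, 2)),
   ((1, 0), (1, 1), (1, 2)),
   ((2, 0), (2, 1), (1, 2)),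
   ((0, 0), (1, 1), (2, 2)),
   ((0, 2), (1, 1), (2, 0)),
   ((0, 0), (1, 0), (2, 0)),
   ((0, 1), (1, 1), (2, 1)),
   ((0, 2), (1, 2), (2, 1))]

def troca_jogador (jogador : String) : String :=
  if jogador == "x" then "o" else "x"

-- body of A's first and second loop (same code, mark = jogador resp. oponente)
def stepMark (m : List (List String)) (mark : String)
    (acc : List (Int × Int)) (x : (Int × Int) × (Int × Int) × (Int × Int)) : List (Int × Int) :=
  let p1 := cell m x.1
  let p2 := cell m x.2.1
  let p3 := cell m x.2.2
  if p1 == p2 && p2 == mark && p3 == "_" then acc ++ [x.2.2]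
  else if p2 == p3 && p3 == mark && p1 == "_" then acc ++ [x.1]
  else if p1 == p3 && p3 == mark && p2 == "_" then acc ++ [x.2.1]
  else acc

-- body of A's third loop ('… and '_' and …' is a truthy non-empty string: a no-op, dropped)
def stepSetup (m : List (List String)) (jogador : String)
    (acc : List (Int × Int)) (x : (Int × Int) × (Int × Int) × (Int × Int)) : List (Int × Int) :=
  let p1 := cell m x.1
  let p2 := cell m x.2.1
  let p3 := cell m x.2.2
  if p1 == jogador && ([p2, p3].count "_" == 2) then acc ++ [x.2.1, x.2.2]
  else if p2 == jogador && ([p1, p3].count "_" == 2) then acc ++ [x.1, x.2.2]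
  else if p3 == jogador && ([p1, p2].count "_" == 2) then acc ++ [x.1, x.2.1]
  else acc

def gerador_dica (matriz : List (List String)) (jogador : String) : List (Int × Int) :=
  let oponente := troca_jogador jogador
  let possibilidades := condicao_vitoria.foldl (stepMark matriz jogador) []
  let possibilidades :=
    if possibilidades.isEmpty then condicao_vitoria.foldl (stepMark matriz oponente) possibilidades
    else possibilidades
  let possibilidades :=
    if possibilidades.isEmpty then condicao_vitoria.foldl (stepSetup matriz jogador) possibilidades
    else possibilidades
  possibilidades

-- ===== PORT B =====
-- one pass: per line update (win, block, setup) simultaneously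
def stepTriple (m : List (List String)) (jogador oponente : String)
    (acc : List (Int × Int) × List (Int × Int) × List (Int × Int))
    (x : (Int × Int) × (Int × Int) × (Int × Int)) :
    List (Int × Int) × List (Int × Int) × List (Int × Int) :=
  let p1 := cell m x.1
  let p2 := cell m x.2.1
  let p3 := cell m x.2.2
  let win :=
    if p1 == p2 && p2 == jogador && p3 == "_" then acc.1 ++ [x.2.2]
    else if p2 == p3 && p3 == jogador && p1 == "_" then acc.1 ++ [x.1]
    else if p1 == p3 && p3 == jogador && p2 == "_" then acc.1 ++ [x.2.1]
    else acc.1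
  let block :=
    if p1 == p2 && p2 == oponente && p3 == "_" then acc.2.1 ++ [x.2.2]
    else if p2 == p3 && p3 == oponente && p1 == "_" then acc.2.1 ++ [x.1]
    else if p1 == p3 && p3 == oponente && p2 == "_" then acc.2.1 ++ [x.2.1]
    else acc.2.1
  let setup :=
    if p1 == jogador && p2 == "_" && p3 == "_" then acc.2.2 ++ [x.2.1, x.2.2]
    else if p2 == jogador && p1 == "_" && p3 == "_" then acc.2.2 ++ [x.1, x.2.2]
    else if p3 == jogador && p1 == "_" && p2 == "_" then acc.2.2 ++ [x.1, x.2.1]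
    else acc.2.2
  (win, block, setup)

def gerador_dica_alt (matriz : List (List String)) (jogador : String) : List (Int × Int) :=
  let oponente := if jogador == "x" then "o" else "x"
  let r := condicao_vitoria.foldl (stepTriple matriz jogador oponente) ([], [], [])
  if !r.1.isEmpty then r.1
  else if !r.2.1.isEmpty then r.2.1
  else r.2.2

-- ===== PRECONDITION & SPEC =====
-- Pre_: exactly the boards on which A returns (it indexes all nine cells matriz[0..2][0..2];
-- on smaller boards Python raises IndexError).
def Pre_gerador_dica (matriz : List (List String)) (jogador : String) : Prop :=
  3 ≤ matriz.length ∧ ∀ row ∈ matriz.take 3, 3 ≤ row.length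
instance (matriz : List (List String)) (jogador : String) : Decidable (Pre_gerador_dica matriz jogador) := by unfold Pre_gerador_dica; infer_instance

def pvWitness_gerador_dica : List (List String) × String :=
  ([["x", "x", "_"], ["o", "_", "o"], ["_", "_", "x"]], "x")

def Spec_gerador_dica (matriz : List (List String)) (jogador : String) (out : List (Int × Int)) : Prop := out = gerador_dica_alt matriz jogador
instance (matriz : List (List String)) (jogador : String) (out : List (Int × Int)) : Decidable (Spec_gerador_dica matriz jogador out) := by unfold Spec_gerador_dica; infer_instance

-- ===== CLAIM (what is proved, stated in full; the proofs are below) =====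
def Claim_equal_gerador_dica : Prop := ∀ (matriz : List (List String)) (jogador : String), Dom_gerador_dica matriz jogador → Pre_gerador_dica matriz jogador → Spec_gerador_dica matriz jogador (gerador_dica matriz jogador)

-- ===== LEMMAS AND PROOFS =====

-- [a, b].count '_' == 2 is exactly: both a and b are '_'
lemma count2_eq (a b : String) :
    (([a, b].count "_" == 2)) = (a == "_" && b == "_") := by
  by_cases ha : a = "_" <;> by_cases hb : b = "_" <;>
    simp [ha, hb]

lemma stepTriple_eq (m : List (List String)) (j op : String)
    (w b s : List (Int × Int)) (x : (Int × Int) × (Int × Int) × (Int × Int)) :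
    stepTriple m j op (w, b, s) x = (stepMark m j w x, stepMark m op b x, stepSetup m j s x) := by
  simp only [stepTriple, stepMark, stepSetup, count2_eq, Bool.and_assoc]

-- the single pass computes exactly the three scans
lemma fold_triple (m : List (List String)) (j op : String)
    (L : List ((Int × Int) × (Int × Int) × (Int × Int))) (w b s : List (Int × Int)) :
    L.foldl (stepTriple m j op) (w, b, s) =
      (L.foldl (stepMark m j) w, L.foldl (stepMark m op) b, L.foldl (stepSetup m j) s) := by
  induction L generalizing w b s with
  | nil => rfl
  | cons x L ih => simp only [List.foldl, stepTriple_eq]; exact ih _ _ _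

-- ===== VERDICT (by name: the statement is the Claim_ definition above) =====
theorem gerador_dica_spec : Claim_equal_gerador_dica := by
  intro matriz jogador _ _
  show gerador_dica matriz jogador = gerador_dica_alt matriz jogador
  unfold gerador_dica gerador_dica_alt troca_jogador
  simp only [fold_triple]
  simp only [List.isEmpty_iff, beq_iff_eq]
  split_ifs <;> simp_all
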